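-- pv_equiv track=rewrite | github.com/sligara7/dnd_creator | backend/core/ability_scores/ability_score_calculator.py | generate_point_buy
-- ===== SOURCE A (Python) =====
-- from typing import Dict, List, Tuple, Optional, Any
--
-- def generate_point_buy(points_spent: Dict[str, int]) -> Dict[str, int]:
--     """
--     Calculate ability scores using the point buy system.
--
--     Args:
--         points_spent: Dictionary mapping ability names to points spent
--
--     Returns:
--         Dict[str, int]: Resulting ability scores
--     """
--     # Base score is 8
--     scores = {ability: 8 for ability in points_spent}
--
--     # Point buy cost table
--     # Score : Cost
--     point_costs = {
--         9: 1, 10: 2, 11: 3, 12: 4, 13: 5, 14: 7, 15: 9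
--     }
--
--     # Calculate scores based on points spent
--     for ability, points in points_spent.items():
--         remaining_points = points
--         score = 8
--
--         while remaining_points > 0 and score < 15:
--             next_score = score + 1
--             cost = point_costs.get(next_score, 0)
--
--             if cost <= remaining_points:
--                 score = next_score
--                 remaining_points -= cost
--             else:
--                 break
--
--         scores[ability] = score
--
--     return scores
-- ===== SOURCE B (Python) =====
-- _THRESH = (1, 3, 6, 10, 15, 22, 31)  # cumulative point cost of raising a score from 8 to 8+k
--
--
-- def generate_point_buy(points_spent):
--     return {ability: 8 + sum(1 for t in _THRESH if t <= points)
--             for ability, points in points_spent.items()}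
-- ===== Notes on version B (the rewrite author's own statement) =====
-- stated objective: simpler
-- what changed: Replaces the per-ability stateful greedy while-loop (spending remaining points against a per-step cost table) with a precomputed cumulative-cost threshold table and a stateless count of thresholds <= points, done in one dict comprehension.
import Mathlib
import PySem

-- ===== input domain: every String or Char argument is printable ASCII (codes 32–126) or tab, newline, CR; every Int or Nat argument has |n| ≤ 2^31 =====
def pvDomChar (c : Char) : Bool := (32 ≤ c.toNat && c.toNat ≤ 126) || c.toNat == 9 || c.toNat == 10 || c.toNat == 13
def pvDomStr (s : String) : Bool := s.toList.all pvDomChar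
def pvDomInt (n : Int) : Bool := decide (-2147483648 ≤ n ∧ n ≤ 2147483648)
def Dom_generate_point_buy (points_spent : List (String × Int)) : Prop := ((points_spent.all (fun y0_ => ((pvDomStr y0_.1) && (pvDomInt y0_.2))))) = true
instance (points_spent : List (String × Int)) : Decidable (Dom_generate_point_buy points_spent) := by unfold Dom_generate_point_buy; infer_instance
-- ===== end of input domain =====

-- B replaces A's per-ability greedy point-spending while-loop by a precomputed
-- cumulative-cost threshold table and a stateless count of thresholds ≤ points
-- (objective: simpler; same asymptotic cost).

-- ===== PORT A =====
-- point_costs = {9: 1, 10: 2, 11: 3, 12: 4, 13: 5, 14: 7, 15: 9}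
def pbPointCosts : PySem.Dict Int Int :=
  PySem.Dict.ofList [(9, 1), (10, 2), (11, 3), (12, 4), (13, 5), (14, 7), (15, 9)]

-- while remaining_points > 0 and score < 15: …
def pbBuyLoop (remaining_points score : Int) : Int :=
  if remaining_points > 0 ∧ score < 15 then
    let next_score := score + 1
    let cost := pbPointCosts.getD next_score 0
    if cost ≤ remaining_points then
      pbBuyLoop (remaining_points - cost) next_score
    else score
  else score
termination_by (15 - score).toNat
decreasing_by omega

def generate_point_buy (points_spent : List (String × Int)) : List (String × Int) :=
  -- scores = {ability: 8 for ability in points_spent}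
  let scores := points_spent.foldl (fun d x => d.insert x.1 (8 : Int)) PySem.Dict.empty
  -- for ability, points in points_spent.items(): … scores[ability] = score
  let scores := points_spent.foldl (fun d x => d.insert x.1 (pbBuyLoop x.2 8)) scores
  scores.items

-- ===== PORT B =====
-- _THRESH = (1, 3, 6, 10, 15, 22, 31)
def pbThresh : List Int := [1, 3, 6, 10, 15, 22, 31]

-- 8 + sum(1 for t in _THRESH if t <= points)   (a 0/1-sum is a countP)
def pbScoreOf (points : Int) : Int := 8 + (pbThresh.countP (fun t => t ≤ points) : Int)

def generate_point_buy_alt (points_spent : List (String × Int)) : List (String × Int) :=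
  (points_spent.foldl (fun d x => d.insert x.1 (pbScoreOf x.2)) PySem.Dict.empty).items

-- ===== PRECONDITION & SPEC =====
def Spec_generate_point_buy (points_spent : List (String × Int)) (out : List (String × Int)) : Prop := out = generate_point_buy_alt points_spent
instance (points_spent : List (String × Int)) (out : List (String × Int)) : Decidable (Spec_generate_point_buy points_spent out) := by unfold Spec_generate_point_buy; infer_instance

-- ===== CLAIM (what is proved, stated in full; the proofs are below) =====
def Claim_equal_generate_point_buy : Prop := ∀ (points_spent : List (String × Int)), Dom_generate_point_buy points_spent → Spec_generate_point_buy points_spent (generate_point_buy points_spent)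

-- ===== LEMMAS AND PROOFS =====

-- closed form of A's greedy loop from each reachable score
lemma pbBuyLoop_15 (r : Int) : pbBuyLoop r 15 = 15 := by
  rw [pbBuyLoop]; simp

lemma pbBuyLoop_14 (r : Int) : pbBuyLoop r 14 = if 9 ≤ r then 15 else 14 := by
  rw [pbBuyLoop]
  have hc : pbPointCosts.getD 15 0 = 9 := by decide
  norm_num [hc, pbBuyLoop_15]
  all_goals omega

lemma pbBuyLoop_13 (r : Int) : pbBuyLoop r 13 = if 16 ≤ r then 15 else if 7 ≤ r then 14 else 13 := by
  rw [pbBuyLoop]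
  have hc : pbPointCosts.getD 14 0 = 7 := by decide
  norm_num [hc, pbBuyLoop_14]
  all_goals omega

lemma pbBuyLoop_12 (r : Int) : pbBuyLoop r 12 =
    if 21 ≤ r then 15 else if 12 ≤ r then 14 else if 5 ≤ r then 13 else 12 := by
  rw [pbBuyLoop]
  have hc : pbPointCosts.getD 13 0 = 5 := by decide
  norm_num [hc, pbBuyLoop_13]
  all_goals omega

lemma pbBuyLoop_11 (r : Int) : pbBuyLoop r 11 =
    if 25 ≤ r then 15 else if 16 ≤ r then 14 else if 9 ≤ r then 13 else if 4 ≤ r then 12 else 11 := by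
  rw [pbBuyLoop]
  have hc : pbPointCosts.getD 12 0 = 4 := by decide
  norm_num [hc, pbBuyLoop_12]
  all_goals omega

lemma pbBuyLoop_10 (r : Int) : pbBuyLoop r 10 =
    if 28 ≤ r then 15 else if 19 ≤ r then 14 else if 12 ≤ r then 13 else if 7 ≤ r then 12
    else if 3 ≤ r then 11 else 10 := by
  rw [pbBuyLoop]
  have hc : pbPointCosts.getD 11 0 = 3 := by decide
  norm_num [hc, pbBuyLoop_11]
  all_goals omega

lemma pbBuyLoop_9 (r : Int) : pbBuyLoop r 9 =
    if 30 ≤ r then 15 else if 21 ≤ r then 14 else if 14 ≤ r then 13 else if 9 ≤ r then 12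
    else if 5 ≤ r then 11 else if 2 ≤ r then 10 else 9 := by
  rw [pbBuyLoop]
  have hc : pbPointCosts.getD 10 0 = 2 := by decide
  norm_num [hc, pbBuyLoop_10]
  all_goals omega

lemma pbBuyLoop_8 (r : Int) : pbBuyLoop r 8 =
    if 31 ≤ r then 15 else if 22 ≤ r then 14 else if 15 ≤ r then 13 else if 10 ≤ r then 12
    else if 6 ≤ r then 11 else if 3 ≤ r then 10 else if 1 ≤ r then 9 else 8 := by
  rw [pbBuyLoop]
  have hc : pbPointCosts.getD 9 0 = 1 := by decide
  norm_num [hc, pbBuyLoop_9]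
  all_goals omega

-- the two per-ability score functions agree everywhere
lemma pbScore_eq (p : Int) : pbBuyLoop p 8 = pbScoreOf p := by
  rw [pbBuyLoop_8]
  simp only [pbScoreOf, pbThresh, List.countP_cons, List.countP_nil, decide_eq_true_eq]
  split_ifs <;> omega

-- value stored for key k by an insert loop: last write wins (first match in l.reverse), else the base dict
lemma pbGetD_foldl_insert (g : String × Int → Int) (l : List (String × Int))
    (d : PySem.Dict String Int) (k : String) (dflt : Int) :
    (l.foldl (fun d x => d.insert x.1 (g x)) d).getD k dflt =
      match l.reverse.find? (fun x => x.1 == k) with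
      | some x => g x
      | none => d.getD k dflt := by
  induction l generalizing d with
  | nil => simp
  | cons a l ih =>
    simp only [List.foldl_cons, List.reverse_cons, List.find?_append]
    rw [ih]
    cases h : l.reverse.find? (fun x => x.1 == k) with
    | some x => simp
    | none =>
      by_cases hk : a.1 = k
      · simp [hk]
      · simp [hk, PySem.Dict.getD_insert, Ne.symm hk]

-- updating a set with elements it already has changes nothing
lemma pbUpdate_self (m : List String) :
    PySem.Set.update (PySem.Set.ofList m) m = PySem.Set.ofList m := by
  rw [PySem.Set.update_eq_append_filter]
  have h : List.filter (fun y => !(PySem.Set.ofList m).contains y) (PySem.Set.ofList m) = [] := by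
    apply List.filter_eq_nil_iff.mpr
    intro y hy
    simp [hy]
  rw [h, List.append_nil]

theorem pb_main (l : List (String × Int)) :
    generate_point_buy l = generate_point_buy_alt l := by
  show (l.foldl (fun d x => d.insert x.1 (pbBuyLoop x.2 8))
          (l.foldl (fun d x => d.insert x.1 (8 : Int)) PySem.Dict.empty)).items
      = (l.foldl (fun d x => d.insert x.1 (pbScoreOf x.2)) PySem.Dict.empty).items
  have hk8 : (l.foldl (fun d x => d.insert x.1 (8 : Int)) PySem.Dict.empty).keys
      = PySem.Set.ofList (l.map Prod.fst) := by
    rw [PySem.Dict.keys_foldl_insert_key, PySem.Dict.keys_empty, PySem.Set.update_nil_left]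
  have hkA : (l.foldl (fun d x => d.insert x.1 (pbBuyLoop x.2 8))
      (l.foldl (fun d x => d.insert x.1 (8 : Int)) PySem.Dict.empty)).keys
      = PySem.Set.ofList (l.map Prod.fst) := by
    rw [PySem.Dict.keys_foldl_insert_key, hk8, pbUpdate_self]
  have hkB : (l.foldl (fun d x => d.insert x.1 (pbScoreOf x.2)) PySem.Dict.empty).keys
      = PySem.Set.ofList (l.map Prod.fst) := by
    rw [PySem.Dict.keys_foldl_insert_key, PySem.Dict.keys_empty, PySem.Set.update_nil_left]
  have hnA : (l.foldl (fun d x => d.insert x.1 (pbBuyLoop x.2 8))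
      (l.foldl (fun d x => d.insert x.1 (8 : Int)) PySem.Dict.empty)).keys.Nodup := by
    apply PySem.Dict.nodup_keys_foldl_insert_key
    apply PySem.Dict.nodup_keys_foldl_insert_key
    exact PySem.Dict.nodup_keys_empty
  have hnB : (l.foldl (fun d x => d.insert x.1 (pbScoreOf x.2)) PySem.Dict.empty).keys.Nodup := by
    apply PySem.Dict.nodup_keys_foldl_insert_key
    exact PySem.Dict.nodup_keys_empty
  rw [PySem.Dict.items_eq_map_keys _ hnA 0, PySem.Dict.items_eq_map_keys _ hnB 0, hkA, hkB]
  apply List.map_congr_left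
  intro k hkmem
  have hmem : k ∈ l.map Prod.fst := by simpa [PySem.Set.mem_ofList] using hkmem
  have hsome : (l.reverse.find? (fun x => x.1 == k)).isSome := by
    rw [List.find?_isSome]
    obtain ⟨x, hx, hxk⟩ := List.mem_map.mp hmem
    exact ⟨x, List.mem_reverse.mpr hx, by simp [hxk]⟩
  obtain ⟨x, hx⟩ := Option.isSome_iff_exists.mp hsome
  rw [pbGetD_foldl_insert (fun x => pbBuyLoop x.2 8), pbGetD_foldl_insert (fun x => pbScoreOf x.2), hx]
  simp [pbScore_eq]

-- ===== VERDICT (by name: the statement is the Claim_ definition above) =====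
theorem generate_point_buy_spec : Claim_equal_generate_point_buy := by
  intro l _
  unfold Spec_generate_point_buy
  exact pb_main l
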